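-- pv_equiv track=rewrite | github.com/jiahuixing/Python | gen_url/tommy/ota_url_lib.py | sort_file_names
-- ===== SOURCE A (Python) =====
-- def sort_file_names(file_names):
--     zip_files = list()
--     fast_boot_files = list()
--     if isinstance(file_names, list):
--         for file_name in file_names:
--             if 'zip' in file_name:
--                 zip_files.append(file_name)
--             else:
--                 if 'tgz' in file_name or 'tar' in file_name:
--                     fast_boot_files.append(file_name)
--     new_file_names = list()
--     if len(fast_boot_files) > 0:
--         for fast_boot_file in fast_boot_files:
--             new_file_names.append(fast_boot_file)
--     if len(zip_files) > 0:
--         for zip_file in zip_files: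
--             new_file_names.append(zip_file)
--     return new_file_names
-- ===== SOURCE B (Python) =====
-- def sort_file_names(file_names):
--     if not isinstance(file_names, list):
--         return []
--     keep = [f for f in file_names if 'zip' in f or 'tgz' in f or 'tar' in f]
--     return sorted(keep, key=lambda f: 'zip' in f)
-- ===== Notes on version B (the rewrite author's own statement) =====
-- stated objective: idiomatic
-- what changed: Replaces the two-bucket append loops plus concatenation pass with a single filter comprehension followed by a stable sort on the boolean key 'zip' in f, so tar/tgz names precede zip names by sort stability.
import Mathlib
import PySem

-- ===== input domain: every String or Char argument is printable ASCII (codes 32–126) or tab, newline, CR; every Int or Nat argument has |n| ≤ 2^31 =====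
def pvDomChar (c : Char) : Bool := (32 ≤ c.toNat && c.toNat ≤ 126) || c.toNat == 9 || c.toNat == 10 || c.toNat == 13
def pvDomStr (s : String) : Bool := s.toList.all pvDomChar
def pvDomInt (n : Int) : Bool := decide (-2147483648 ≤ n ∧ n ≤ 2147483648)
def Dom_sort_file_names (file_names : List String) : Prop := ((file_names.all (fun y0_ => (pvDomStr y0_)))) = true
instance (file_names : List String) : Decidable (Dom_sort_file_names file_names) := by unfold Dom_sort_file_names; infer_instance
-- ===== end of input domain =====

-- B replaces A's two-bucket append loops with filter-then-stable-sort on the boolean key 'zip' in f (idiomatic; same result).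

-- ===== PORT A =====
def sort_file_names (file_names : List String) : List String :=
  -- two buckets built in one loop (the isinstance(list) test is always true under the type convention)
  let st := file_names.foldl
    (fun (st : List String × List String) file_name =>
      if PySem.Str.isIn "zip" file_name then (st.1 ++ [file_name], st.2)
      else if PySem.Str.isIn "tgz" file_name || PySem.Str.isIn "tar" file_name then
        (st.1, st.2 ++ [file_name])
      else st)
    ([], [])
  let zip_files := st.1
  let fast_boot_files := st.2
  let new_file_names : List String := []
  let new_file_names :=
    if fast_boot_files.length > 0 then
      fast_boot_files.foldl (fun acc x => acc ++ [x]) new_file_names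
    else new_file_names
  let new_file_names :=
    if zip_files.length > 0 then
      zip_files.foldl (fun acc x => acc ++ [x]) new_file_names
    else new_file_names
  new_file_names

-- ===== PORT B =====
def sort_file_names_alt (file_names : List String) : List String :=
  let keep := file_names.filter (fun f =>
    PySem.Str.isIn "zip" f || PySem.Str.isIn "tgz" f || PySem.Str.isIn "tar" f)
  PySem.List.sorted keep (fun f => PySem.Str.isIn "zip" f) false

-- ===== PRECONDITION & SPEC =====
def Spec_sort_file_names (file_names : List String) (out : List String) : Prop := out = sort_file_names_alt file_names
instance (file_names : List String) (out : List String) : Decidable (Spec_sort_file_names file_names out) := by unfold Spec_sort_file_names; infer_instance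

-- ===== CLAIM (what is proved, stated in full; the proofs are below) =====
def Claim_equal_sort_file_names : Prop := ∀ (file_names : List String), Dom_sort_file_names file_names → Spec_sort_file_names file_names (sort_file_names file_names)

-- ===== LEMMAS AND PROOFS =====

-- inserting a true-keyed element goes to the very end (Bool key: nothing is > true)
theorem insertBy_true_key {key : String → Bool} {x : String} (hx : key x = true)
    (ys : List String) :
    PySem.List.insertBy (fun a b => decide (key a < key b)) x ys = ys ++ [x] := by
  apply PySem.List.insertBy_of_forall_not_before
  intro y _
  simp [hx]

-- inserting a false-keyed element lands between the false block and the true block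
theorem insertBy_false_key {key : String → Bool} {x : String} (hx : key x = false)
    (fs ts : List String) (hf : ∀ y ∈ fs, key y = false) (ht : ∀ y ∈ ts, key y = true) :
    PySem.List.insertBy (fun a b => decide (key a < key b)) x (fs ++ ts) = fs ++ x :: ts := by
  induction fs with
  | nil =>
    cases ts with
    | nil => simp [PySem.List.insertBy]
    | cons y ys =>
      have hy : key y = true := ht y (by simp)
      simp [PySem.List.insertBy, hx, hy]
  | cons f fs ih =>
    have hfk : key f = false := hf f (by simp)
    have ih' := ih (fun y hy => hf y (List.mem_cons_of_mem f hy))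
    simp only [List.cons_append, PySem.List.insertBy, hx, hfk]
    simp [ih']

-- stable sort on a Bool key is exactly "false block ++ true block", in original order
theorem sorted_bool_key (key : String → Bool) (xs : List String) :
    ∀ (fs ts : List String), (∀ y ∈ fs, key y = false) → (∀ y ∈ ts, key y = true) →
    xs.foldl (fun acc x => PySem.List.insertBy (fun a b => decide (key a < key b)) x acc)
      (fs ++ ts)
    = (fs ++ xs.filter (fun f => !key f)) ++ (ts ++ xs.filter key) := by
  induction xs with
  | nil => intro fs ts _ _; simp
  | cons x xs ih =>
    intro fs ts hf ht
    rw [List.foldl_cons]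
    by_cases hx : key x = true
    · rw [insertBy_true_key hx, List.append_assoc fs ts [x]]
      have ht' : ∀ y ∈ ts ++ [x], key y = true := by
        intro y hy
        rcases List.mem_append.mp hy with h | h
        · exact ht y h
        · simp at h; rw [h]; exact hx
      rw [ih fs (ts ++ [x]) hf ht']
      simp [hx]
    · have hx' : key x = false := by simpa using hx
      rw [insertBy_false_key hx' fs ts hf ht]
      have hsplit : fs ++ x :: ts = (fs ++ [x]) ++ ts := by simp
      have hf' : ∀ y ∈ fs ++ [x], key y = false := by
        intro y hy
        rcases List.mem_append.mp hy with h | h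
        · exact hf y h
        · simp at h; rw [h]; exact hx'
      rw [hsplit, ih (fs ++ [x]) ts hf' ht]
      simp [hx']

-- A's bucket loop computes the two filters
theorem bucket_loop (xs : List String) : ∀ (a b : List String),
    xs.foldl
      (fun (st : List String × List String) f =>
        if PySem.Str.isIn "zip" f then (st.1 ++ [f], st.2)
        else if PySem.Str.isIn "tgz" f || PySem.Str.isIn "tar" f then (st.1, st.2 ++ [f])
        else st)
      (a, b)
    = (a ++ xs.filter (fun f => PySem.Str.isIn "zip" f),
       b ++ xs.filter (fun f =>
         !PySem.Str.isIn "zip" f && (PySem.Str.isIn "tgz" f || PySem.Str.isIn "tar" f))) := by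
  induction xs with
  | nil => intro a b; simp
  | cons x xs ih =>
    intro a b
    rw [List.foldl_cons]
    by_cases h1 : PySem.Str.isIn "zip" x
    · rw [if_pos h1, ih]
      simp only [List.filter_cons, h1]
      simp
    · rw [if_neg h1]
      have h1' : PySem.Str.isIn "zip" x = false := by simpa using h1
      by_cases h2 : (PySem.Str.isIn "tgz" x || PySem.Str.isIn "tar" x) = true
      · rw [if_pos h2, ih]
        simp only [List.filter_cons, h1', h2]
        simp
      · have h2' : (PySem.Str.isIn "tgz" x || PySem.Str.isIn "tar" x) = false := by simpa using h2
        rw [if_neg h2, ih]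
        simp only [List.filter_cons, h1', h2']
        simp

-- A's guarded append loops are plain concatenation
theorem append_loop_if (l acc : List String) :
    (if l.length > 0 then l.foldl (fun a x => a ++ [x]) acc else acc) = acc ++ l := by
  cases l with
  | nil => simp
  | cons x xs =>
    rw [if_pos (by simp), PySem.List.foldl_append_singleton_eq_self]

-- ===== VERDICT (by name: the statement is the Claim_ definition above) =====
theorem sort_file_names_spec : Claim_equal_sort_file_names := by
  intro file_names _
  show sort_file_names file_names = sort_file_names_alt file_names
  unfold sort_file_names sort_file_names_alt
  rw [bucket_loop]
  rw [PySem.List.sorted_eq_foldl_insertBy]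
  rw [show ([] : List String) = ([] : List String) ++ ([] : List String) from rfl,
    sorted_bool_key (fun f => PySem.Str.isIn "zip" f) _ [] []
      (by intro y hy; simp at hy) (by intro y hy; simp at hy)]
  simp only [append_loop_if, List.nil_append, List.filter_filter]
  have hfast :
      file_names.filter (fun f => !PySem.Str.isIn "zip" f &&
        (PySem.Str.isIn "zip" f || PySem.Str.isIn "tgz" f || PySem.Str.isIn "tar" f))
      = file_names.filter (fun f =>
        !PySem.Str.isIn "zip" f && (PySem.Str.isIn "tgz" f || PySem.Str.isIn "tar" f)) := by
    apply List.filter_congr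
    intro f _
    cases h : PySem.Str.isIn "zip" f <;> simp
  have hzip :
      file_names.filter (fun f => PySem.Str.isIn "zip" f &&
        (PySem.Str.isIn "zip" f || PySem.Str.isIn "tgz" f || PySem.Str.isIn "tar" f))
      = file_names.filter (fun f => PySem.Str.isIn "zip" f) := by
    apply List.filter_congr
    intro f _
    cases h : PySem.Str.isIn "zip" f <;> simp
  rw [hfast, hzip]
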